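-- pv_equiv track=rewrite | github.com/chinskiy/labsSRM | lab1/big_int.py | rae
-- ===== SOURCE A (Python) =====
-- def rae(numb1, module):
--     ost = 0
--     arr = []
--     while ost != 1:
--         arr.append(module // numb1)
--         ost = module % numb1
--         module = numb1
--         numb1 = ost
--     return arr
-- ===== SOURCE B (Python) =====
-- def rae(numb1, module):
--     # Stage 1: build the full Euclidean remainder chain, ending at remainder 1.
--     chain = [module, numb1]
--     while chain[-1] != 1:
--         chain.append(chain[-2] % chain[-1])
--     # Stage 2: read the quotients off consecutive chain elements.
--     return [chain[i] // chain[i + 1] for i in range(len(chain) - 2)]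
-- ===== Notes on version B (the rewrite author's own statement) =====
-- stated objective: simpler
-- what changed: Replaces the single while-loop mutating four locals with two staged passes: first build the full Euclidean remainder chain as a list until it ends in 1, then read the quotients off consecutive chain elements with a comprehension.
import Mathlib
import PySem

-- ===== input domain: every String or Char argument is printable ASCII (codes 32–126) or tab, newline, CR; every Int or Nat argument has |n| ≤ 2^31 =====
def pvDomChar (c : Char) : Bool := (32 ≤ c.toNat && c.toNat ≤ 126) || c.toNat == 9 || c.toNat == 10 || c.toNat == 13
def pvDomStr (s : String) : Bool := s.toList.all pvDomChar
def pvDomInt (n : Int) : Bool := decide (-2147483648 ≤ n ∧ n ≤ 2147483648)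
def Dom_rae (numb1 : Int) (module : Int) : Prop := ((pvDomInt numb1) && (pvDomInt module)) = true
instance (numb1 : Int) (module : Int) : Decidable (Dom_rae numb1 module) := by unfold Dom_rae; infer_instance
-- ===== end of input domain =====

-- B builds the whole Euclidean remainder chain in one pass and then reads the
-- quotients off consecutive chain elements in a second pass (simpler, staged
-- decomposition instead of A's four mutating locals).


-- ===== PORT A =====
-- A's while-loop, transliterated with a fuel bound (the loop terminates within
-- numb1.toNat + 2 steps on every input admitted by Pre_rae; fuel only makes it total).
def raeLoop : Nat → Int → List Int → Int → Int → List Int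
  | 0, _, arr, _, _ => arr
  | f + 1, ost, arr, module, numb1 =>
    if ost = 1 then arr
    else
      let q := PySem.Int.floordiv module numb1
      let ost' := PySem.Int.mod module numb1
      raeLoop f ost' (arr ++ [q]) numb1 ost'

def rae (numb1 : Int) (module : Int) : List Int :=
  raeLoop (numb1.toNat + 2) 0 [] module numb1

-- ===== PORT B =====
-- Stage 1 of Source B: extend the chain while chain[-1] != 1 (fuel makes it total;
-- the chain always has length ≥ 2 here, so the match fallback is unreachable).
def raeChainLoop : Nat → List Int → List Int
  | 0, chain => chain
  | f + 1, chain =>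
    match PySem.List.pyGet? chain (-1), PySem.List.pyGet? chain (-2) with
    | some last, some prev =>
      if last = 1 then chain
      else raeChainLoop f (chain ++ [PySem.Int.mod prev last])
    | _, _ => chain

-- Stage 2 of Source B: the comprehension over range(len(chain) - 2); every index is
-- in range, so getD is exact for chain[i].
def raeQuots (chain : List Int) : List Int :=
  (List.range (chain.length - 2)).map
    (fun i => PySem.Int.floordiv (chain.getD i 0) (chain.getD (i + 1) 0))

def rae_alt (numb1 : Int) (module : Int) : List Int :=
  raeQuots (raeChainLoop (numb1.toNat + 2) [module, numb1])

-- ===== PRECONDITION & SPEC =====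
-- A raises ZeroDivisionError when numb1 = 0, when numb1 < 0 or numb1 = 1 (the
-- remainder chain then reaches 0, never 1), and when gcd(numb1, module) ≠ 1
-- (the chain ends in gcd, 0 without passing through 1); it returns normally on
-- every other input, so Pre_rae is exactly the set where A returns.
def Pre_rae (numb1 : Int) (module : Int) : Prop :=
  2 ≤ numb1 ∧ Int.gcd numb1 module = 1

instance (numb1 : Int) (module : Int) : Decidable (Pre_rae numb1 module) := by
  unfold Pre_rae; infer_instance

def pvWitness_rae : Int × Int := (7, 40)

def Spec_rae (numb1 : Int) (module : Int) (out : List Int) : Prop := out = rae_alt numb1 module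
instance (numb1 : Int) (module : Int) (out : List Int) : Decidable (Spec_rae numb1 module out) := by unfold Spec_rae; infer_instance

-- ===== CLAIM (what is proved, stated in full; the proofs are below) =====
def Claim_equal_rae : Prop := ∀ (numb1 : Int) (module : Int), Dom_rae numb1 module → Pre_rae numb1 module → Spec_rae numb1 module (rae numb1 module)

-- ===== LEMMAS AND PROOFS =====

-- Common reference recursion: the quotient list of the Euclidean pair (n, m).
def gQ : Nat → Int → Int → List Int
  | 0, _, _ => []
  | f + 1, n, m =>
    let q := PySem.Int.floordiv m n
    let r := PySem.Int.mod m n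
    if r = 1 then [q] else q :: gQ f r n

lemma pv_mod_nonneg (a b : Int) (hb : 2 ≤ b) : 0 ≤ PySem.Int.mod a b := by
  rw [PySem.Int.mod_eq_emod_of_pos (by omega : (0:Int) < b)]
  exact Int.emod_nonneg a (by omega)

lemma pv_mod_lt_self (a b : Int) (hb : 2 ≤ b) : PySem.Int.mod a b < b := by
  rw [PySem.Int.mod_eq_emod_of_pos (by omega : (0:Int) < b)]
  exact Int.emod_lt_of_pos a (by omega)

lemma pv_gcd_mod_step (a b : Int) (hb : 2 ≤ b) :
    Int.gcd (PySem.Int.mod a b) b = Int.gcd b a := by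
  rw [PySem.Int.mod_eq_emod_of_pos (by omega : (0:Int) < b), Int.gcd_emod,
    Int.gcd_comm]

lemma pv_mod_two_le (a b : Int) (hb : 2 ≤ b) (hg : Int.gcd b a = 1)
    (h1 : PySem.Int.mod a b ≠ 1) : 2 ≤ PySem.Int.mod a b := by
  have h0 : 0 ≤ PySem.Int.mod a b := pv_mod_nonneg a b hb
  have hz : PySem.Int.mod a b ≠ 0 := by
    intro hz
    have := pv_gcd_mod_step a b hb
    rw [hz, hg] at this
    simp [Int.gcd] at this
    omega
  omega

-- A's loop produces the reference quotient list.
lemma raeLoop_eq_gQ :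
    ∀ (f : Nat) (numb1 module ost : Int) (arr : List Int),
      ost ≠ 1 → 2 ≤ numb1 → Int.gcd numb1 module = 1 →
      numb1.toNat + 1 ≤ f →
      raeLoop f ost arr module numb1 = arr ++ gQ f numb1 module := by
  intro f
  induction f with
  | zero => intro numb1 module ost arr _ h2 _ hf; omega
  | succ f ih =>
    intro numb1 module ost arr host h2 hg hf
    simp only [raeLoop, gQ, if_neg host]
    set q := PySem.Int.floordiv module numb1 with hq
    set ost' := PySem.Int.mod module numb1 with host'
    by_cases h1 : ost' = 1
    · obtain ⟨f', rfl⟩ : ∃ f', f = f' + 1 := ⟨f - 1, by omega⟩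
      simp [raeLoop, h1]
    · have hlt : ost' < numb1 := pv_mod_lt_self module numb1 h2
      have h2' : 2 ≤ ost' := pv_mod_two_le module numb1 h2 hg h1
      have hg' : Int.gcd ost' numb1 = 1 := by
        rw [host', pv_gcd_mod_step module numb1 h2, hg]
      have hfuel : ost'.toNat + 1 ≤ f := by omega
      rw [ih ost' numb1 ost' (arr ++ [q]) h1 h2' hg' hfuel]
      simp [h1]

-- Reference remainder chain that B's stage 1 produces after the leading pair.
def chainC : Nat → Int → Int → List Int
  | 0, n, _ => [n]
  | f + 1, n, m =>
    if PySem.Int.mod m n = 1 then [n, 1]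
    else n :: chainC f (PySem.Int.mod m n) n

lemma chainC_one_le_length (f : Nat) (n m : Int) : 1 ≤ (chainC f n m).length := by
  cases f with
  | zero => simp [chainC]
  | succ f => by_cases h1 : PySem.Int.mod m n = 1 <;> simp [chainC, h1]

lemma chainC_two_le_length (f : Nat) (n m : Int) (h2 : 2 ≤ n)
    (hg : Int.gcd n m = 1) (hf : n.toNat + 1 ≤ f) :
    2 ≤ (chainC f n m).length := by
  obtain ⟨f', rfl⟩ : ∃ f', f = f' + 1 := ⟨f - 1, by omega⟩
  by_cases h1 : PySem.Int.mod m n = 1 <;>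
    simp [chainC, h1, chainC_one_le_length]

lemma pyGet?_last_two (pre : List Int) (a b : Int) :
    PySem.List.pyGet? (pre ++ [a, b]) (-1) = some b ∧
    PySem.List.pyGet? (pre ++ [a, b]) (-2) = some a := by
  constructor
  · rw [show pre ++ [a, b] = (pre ++ [a]) ++ [b] by simp]
    exact PySem.List.pyGet?_neg_one_append_singleton _ _
  · rw [PySem.List.pyGet?_neg_ofNat _ 2 (by omega) (by simp)]
    simp

-- B's stage-1 loop produces exactly the reference chain after the prefix.
lemma raeChainLoop_eq_chainC :
    ∀ (f : Nat) (pre : List Int) (m n : Int),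
      2 ≤ n → Int.gcd n m = 1 → n.toNat + 1 ≤ f →
      raeChainLoop f (pre ++ [m, n]) = (pre ++ [m]) ++ chainC f n m := by
  intro f
  induction f with
  | zero => intro pre m n h2 _ hf; omega
  | succ f ih =>
    intro pre m n h2 hg hf
    obtain ⟨hlast, hprev⟩ := pyGet?_last_two pre m n
    simp only [raeChainLoop, hlast, hprev]
    rw [if_neg (by omega : ¬ n = 1)]
    set r := PySem.Int.mod m n with hr
    by_cases h1 : r = 1
    · -- next step sees last = 1 and stops
      obtain ⟨f', rfl⟩ : ∃ f', f = f' + 1 := ⟨f - 1, by omega⟩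
      rw [h1]
      rw [show (pre ++ [m, n]) ++ [(1 : Int)] = (pre ++ [m]) ++ [n, 1] by simp]
      have ha := (pyGet?_last_two (pre ++ [m]) n 1).1
      have hb := (pyGet?_last_two (pre ++ [m]) n 1).2
      simp only [raeChainLoop, ha, hb]
      simp [chainC, ← hr, h1]
    · have h2' : 2 ≤ r := pv_mod_two_le m n h2 hg h1
      have hlt : r < n := pv_mod_lt_self m n h2
      have hg' : Int.gcd r n = 1 := by rw [hr, pv_gcd_mod_step m n h2, hg]
      have := ih (pre ++ [m]) n r h2' hg' (by omega)
      rw [show (pre ++ [m, n]) ++ [r] = (pre ++ [m]) ++ [n, r] by simp, this]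
      simp [chainC, h1, ← hr]

lemma raeQuots_cons (x : Int) (c : List Int) (hc : 2 ≤ c.length) :
    raeQuots (x :: c) = PySem.Int.floordiv x (c.getD 0 0) :: raeQuots c := by
  unfold raeQuots
  have hlen : (x :: c).length - 2 = (c.length - 2) + 1 := by
    simp [List.length_cons]; omega
  rw [hlen, List.range_succ_eq_map]
  simp [List.map_map, Function.comp]

lemma raeQuots_chainC (f : Nat) :
    ∀ (m n : Int), 2 ≤ n → Int.gcd n m = 1 → n.toNat + 1 ≤ f →
      raeQuots (m :: chainC f n m) = gQ f n m := by
  induction f with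
  | zero => intro m n h2 _ hf; omega
  | succ f ih =>
    intro m n h2 hg hf
    by_cases h1 : PySem.Int.mod m n = 1
    · simp only [chainC, gQ, if_pos h1]
      simp [raeQuots, List.range_one]
    · set r := PySem.Int.mod m n with hr
      have h2' : 2 ≤ r := pv_mod_two_le m n h2 hg h1
      have hlt : r < n := pv_mod_lt_self m n h2
      have hg' : Int.gcd r n = 1 := by rw [hr, pv_gcd_mod_step m n h2, hg]
      have hlen : 2 ≤ (n :: chainC f r n).length := by
        have := chainC_two_le_length f r n h2' hg' (by omega)
        simp; omega
      simp only [chainC, gQ, if_neg h1, ← hr]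
      rw [raeQuots_cons m (n :: chainC f r n) hlen]
      rw [ih n r h2' hg' (by omega)]
      simp

-- ===== VERDICT (by name: the statement is the Claim_ definition above) =====
theorem rae_spec : Claim_equal_rae := by
  intro numb1 module _ hpre
  obtain ⟨h2, hg⟩ := hpre
  unfold Spec_rae rae rae_alt
  rw [raeLoop_eq_gQ (numb1.toNat + 2) numb1 module 0 [] (by decide) h2 hg (by omega)]
  have hchain := raeChainLoop_eq_chainC (numb1.toNat + 2) [] module numb1 h2 hg (by omega)
  simp only [List.nil_append] at hchain
  rw [hchain, show ([module] ++ chainC (numb1.toNat + 2) numb1 module : List Int)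
      = module :: chainC (numb1.toNat + 2) numb1 module from rfl]
  rw [raeQuots_chainC (numb1.toNat + 2) module numb1 h2 hg (by omega)]
  simp
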